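-- pv_equiv track=rewrite | github.com/joonaspessi/aoc | src/22.py | getDependencies
-- ===== SOURCE A (Python) =====
-- from collections import defaultdict
--
-- def getDependencies(children, b):
--     inDeg = defaultdict(int)
--     for kids in children.values():
--         for c in kids:
--             inDeg[c] += 1
--     dep = -1
--     q = [b]
--     while q:
--         i = q.pop()
--         dep += 1
--         for c in children[i]:
--             inDeg[c] -= 1
--             if inDeg[c] == 0:
--                 q.append(c)
--
--     return dep
-- ===== SOURCE B (Python) =====
-- from collections import Counter
--
--
-- def getDependencies(children, b):
--     # Round-based least-fixpoint computation instead of A's stack-driven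
--     # cascade: a node is freed iff its total in-degree is covered by the
--     # "supply" of decrements contributed by the initial pop of b plus one pop
--     # of every freed node.  Each round moves every currently covered pending
--     # node into the freed set at once and extends the supply with their child
--     # lists; when a round frees nothing, the freed set is the least fixpoint
--     # and its size is the answer.  Like A, this looks up children[.] for b and
--     # for every freed node (KeyError on the same inputs as A).
--     need = Counter(c for kids in children.values() for c in kids)
--     freed = []
--     pending = list(need)
--     supply = Counter(children[b])
--     while True:
--         newly = [x for x in pending if need[x] <= supply[x]]
--         if not newly:
--             return len(freed)
--         freed += newly
--         ns = set(newly)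
--         pending = [x for x in pending if x not in ns]
--         for k in newly:
--             supply.update(children[k])
-- ===== Notes on version B (the rewrite author's own statement) =====
-- stated objective: alternative
-- what changed: Replaces A's stack-driven one-node-at-a-time cascade with a round-based least-fixpoint computation: starting from the supply of decrements contributed by b, each round frees every pending node whose whole in-degree is already covered and adds its child list to the supply, stopping when a round frees nothing and returning the size of the fixpoint.
import Mathlib
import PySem

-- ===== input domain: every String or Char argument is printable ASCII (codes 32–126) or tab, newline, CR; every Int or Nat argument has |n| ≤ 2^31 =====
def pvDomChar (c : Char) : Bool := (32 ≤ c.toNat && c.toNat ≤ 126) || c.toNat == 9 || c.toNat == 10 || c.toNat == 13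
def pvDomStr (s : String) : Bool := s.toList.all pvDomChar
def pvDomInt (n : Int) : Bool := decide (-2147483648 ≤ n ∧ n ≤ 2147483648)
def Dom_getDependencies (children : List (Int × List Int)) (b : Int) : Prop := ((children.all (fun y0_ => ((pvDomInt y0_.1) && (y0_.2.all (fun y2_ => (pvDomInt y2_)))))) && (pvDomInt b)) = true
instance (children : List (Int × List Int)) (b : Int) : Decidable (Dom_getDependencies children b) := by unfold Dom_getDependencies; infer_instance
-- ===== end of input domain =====

-- B replaces A's stack-driven one-node-at-a-time cascade by a round-based least-fixpoint
-- computation (free every covered pending node at once, extend the supply, repeat until a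
-- round frees nothing); equal return values on Pre_ (= exactly the inputs where A returns).

-- ===== PORT A =====
-- one step of A's inner `for c in children[i]` loop: decrement inDeg[c], push c on q if it hit 0
def degStepA (p : PySem.Dict Int Int × List Int) (c : Int) : PySem.Dict Int Int × List Int :=
  let v := p.1.getD c 0 - 1
  (p.1.insert c v, if v = 0 then c :: p.2 else p.2)

-- A's `while q` loop; the list `q` is A's stack with its TOP as the list HEAD (q.pop()/append
-- act at the top).  `children[i]` is totalized as getD i [] (Python raises KeyError there; such
-- inputs are outside Pre_).  The Nat argument is a fuel guard only (proved sufficient below).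
def loopA (children : List (Int × List Int)) : Nat → List Int → PySem.Dict Int Int → Int → Int
  | 0, _, _, dep => dep
  | _ + 1, [], _, dep => dep
  | f + 1, i :: q, d, dep =>
    let s := ((PySem.Dict.mk children).getD i []).foldl degStepA (d, q)
    loopA children f s.2 s.1 (dep + 1)

def getDependencies (children : List (Int × List Int)) (b : Int) : Int :=
  -- for kids in children.values(): for c in kids: inDeg[c] += 1   (defaultdict(int))
  let inDeg := ((PySem.Dict.mk children).values).foldl
    (fun d kids => kids.foldl (fun d c => d.insert c (d.getD c 0 + 1)) d) PySem.Dict.empty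
  loopA children (2 * ((PySem.Dict.mk children).values.flatMap id).length + 2) [b] inDeg (-1)

-- ===== PORT B =====
-- supply.update(kids): Counter update, add 1 per occurrence
def bumpAll (s : PySem.Dict Int Int) (kids : List Int) : PySem.Dict Int Int :=
  kids.foldl (fun s c => s.insert c (s.getD c 0 + 1)) s

-- B's `while True` round loop over state (freed, pending, supply); fuel guard only.
-- `x not in set(newly)` is membership in newly; `children[k]` is totalized as getD k []
-- exactly as in port A (Python raises KeyError there; such inputs are outside Pre_).
def roundsB (children : List (Int × List Int)) (need : PySem.Dict Int Int) :
    Nat → List Int → List Int → PySem.Dict Int Int → Int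
  | 0, freed, _, _ => (freed.length : Int)
  | f + 1, freed, pending, supply =>
    let newly := pending.filter (fun x => decide (need.getD x 0 ≤ supply.getD x 0))
    if newly.isEmpty then (freed.length : Int)
    else roundsB children need f (freed ++ newly)
      (pending.filter (fun x => decide (x ∉ newly)))
      (newly.foldl (fun s k => bumpAll s ((PySem.Dict.mk children).getD k [])) supply)

def getDependencies_alt (children : List (Int × List Int)) (b : Int) : Int :=
  -- need = Counter(c for kids in children.values() for c in kids); pending = list(need);
  -- supply = Counter(children[b]) (totalized: getD b [], outside Pre_ like A)
  let need := PySem.Dict.counter ((PySem.Dict.mk children).values.flatMap id)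
  roundsB children need (need.keys.length + 1) [] need.keys
    (PySem.Dict.counter ((PySem.Dict.mk children).getD b []))

-- ===== PRECONDITION & SPEC =====
-- children[i] as Python's dict lookup sees it, totalized ([] outside the dict)
def pvKids (children : List (Int × List Int)) (i : Int) : List Int :=
  (PySem.Dict.mk children).getD i []
-- all child occurrences, in dict order
def pvFlat (children : List (Int × List Int)) : List Int :=
  (PySem.Dict.mk children).values.flatMap id
-- total in-degree of x
def pvNeed (children : List (Int × List Int)) (x : Int) : Nat := (pvFlat children).count x
-- decrements x can receive from the initial pop of b plus one pop of each node in S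
def pvSup (children : List (Int × List Int)) (b : Int) (S : List Int) (x : Int) : Nat :=
  (pvKids children b).count x + (S.flatMap (pvKids children)).count x
-- one round of the freed-set closure operator
def pvStep (children : List (Int × List Int)) (b : Int) (S : List Int) : List Int :=
  ((pvFlat children).dedup).filter (fun x => decide (pvNeed children x ≤ pvSup children b S x))
def pvIter (children : List (Int × List Int)) (b : Int) : Nat → List Int
  | 0 => []
  | n + 1 => pvStep children b (pvIter children b n)
-- the set of nodes A's cascade frees: least fixpoint of pvStep (stable after ≤ |dedup| rounds)
def pvFreed (children : List (Int × List Int)) (b : Int) : List Int :=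
  pvIter children b ((pvFlat children).dedup.length + 1)

-- Pre_ holds exactly where the Python A returns: b is a key and every node the cascade frees
-- is a key; on every other input A raises KeyError (the port totalizes children[i] to [], and
-- the A = B proof below in fact never needs Pre_: it only fences off Python's raising inputs).
def Pre_getDependencies (children : List (Int × List Int)) (b : Int) : Prop :=
  b ∈ children.map Prod.fst ∧ ∀ x ∈ pvFreed children b, x ∈ children.map Prod.fst
instance (children : List (Int × List Int)) (b : Int) : Decidable (Pre_getDependencies children b) := by
  unfold Pre_getDependencies; infer_instance

def pvWitness_getDependencies : (List (Int × List Int)) × Int := ([(0, [1]), (1, [])], 0)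

def Spec_getDependencies (children : List (Int × List Int)) (b : Int) (out : Int) : Prop := out = getDependencies_alt children b
instance (children : List (Int × List Int)) (b : Int) (out : Int) : Decidable (Spec_getDependencies children b out) := by unfold Spec_getDependencies; infer_instance

-- ===== CLAIM (what is proved, stated in full; the proofs are below) =====
def Claim_equal_getDependencies : Prop := ∀ (children : List (Int × List Int)) (b : Int), Dom_getDependencies children b → Pre_getDependencies children b → Spec_getDependencies children b (getDependencies children b)

-- ===== LEMMAS AND PROOFS =====

-- a set M is closed under the freeing rule
def PreFix (children : List (Int × List Int)) (b : Int) (M : List Int) : Prop :=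
  ∀ x, 1 ≤ pvNeed children x → pvNeed children x ≤ pvSup children b M x → x ∈ M

theorem pvSup_append (children : List (Int × List Int)) (b : Int) (S T : List Int) (x : Int) :
    pvSup children b (S ++ T) x = pvSup children b S x + (T.flatMap (pvKids children)).count x := by
  simp [pvSup, List.flatMap_append, List.count_append]; omega

theorem count_flatMap_sum (f : Int → List Int) (x : Int) : ∀ (S : List Int),
    (S.flatMap f).count x = (S.map (fun k => (f k).count x)).sum := by
  intro S
  induction S with
  | nil => simp
  | cons k ks ih => simp [List.count_append, ih]

theorem count_flatMap_le_of_subset (children : List (Int × List Int)) (S L : List Int)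
    (hnd : S.Nodup) (hsub : S ⊆ L) (x : Int) :
    (S.flatMap (pvKids children)).count x ≤ (L.flatMap (pvKids children)).count x := by
  rw [count_flatMap_sum, count_flatMap_sum]
  obtain ⟨l', hperm, hsl⟩ := hnd.subperm hsub
  calc (S.map fun k => (pvKids children k).count x).sum
      = (l'.map fun k => (pvKids children k).count x).sum :=
        ((hperm.map _).sum_eq).symm
    _ ≤ (L.map fun k => (pvKids children k).count x).sum :=
        (hsl.map _).sum_le_sum (fun a _ => Nat.zero_le a)

theorem pvSup_mono (children : List (Int × List Int)) (b : Int) (S L : List Int)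
    (hnd : S.Nodup) (hsub : S ⊆ L) (x : Int) :
    pvSup children b S x ≤ pvSup children b L x := by
  have := count_flatMap_le_of_subset children S L hnd hsub x
  simp only [pvSup]; omega

-- ---- A-side: scan of one child list ----
def scanD : List Int → PySem.Dict Int Int → PySem.Dict Int Int
  | [], d => d
  | c :: cs, d => scanD cs (d.insert c (d.getD c 0 - 1))

def zlist : List Int → PySem.Dict Int Int → List Int
  | [], _ => []
  | c :: cs, d => (if d.getD c 0 - 1 = 0 then [c] else []) ++ zlist cs (d.insert c (d.getD c 0 - 1))

theorem foldA_eq (kids : List Int) : ∀ (d : PySem.Dict Int Int) (q : List Int),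
    kids.foldl degStepA (d, q) = (scanD kids d, (zlist kids d).reverse ++ q) := by
  induction kids with
  | nil => intro d q; simp [scanD, zlist]
  | cons c cs ih =>
    intro d q
    simp only [List.foldl_cons, degStepA, scanD, zlist]
    by_cases h : d.getD c 0 - 1 = 0 <;> simp [h, ih]

theorem getD_scanD (kids : List Int) : ∀ (d : PySem.Dict Int Int) (x : Int),
    (scanD kids d).getD x 0 = d.getD x 0 - (kids.count x : Int) := by
  induction kids with
  | nil => intro d x; simp [scanD]
  | cons c cs ih =>
    intro d x
    by_cases h : x = c
    · subst h
      simp only [scanD, ih, PySem.Dict.getD_insert, List.count_cons_self]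
      push_cast; ring
    · simp only [scanD, ih, PySem.Dict.getD_insert, if_neg h, List.count_cons_of_ne (Ne.symm h)]

theorem zlist_mem (kids : List Int) : ∀ (d : PySem.Dict Int Int) (x : Int),
    x ∈ zlist kids d ↔ (1 ≤ d.getD x 0 ∧ d.getD x 0 ≤ (kids.count x : Int)) := by
  induction kids with
  | nil => intro d x; simp [zlist]; omega
  | cons c cs ih =>
    intro d x
    by_cases h : x = c
    · subst h
      simp only [zlist, List.mem_append, ih, PySem.Dict.getD_insert,
        List.count_cons_self]
      constructor
      · rintro (hz | ⟨h1, h2⟩)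
        · have ht : d.getD x 0 - 1 = 0 := by
            by_contra hc; simp [hc] at hz
          push_cast; omega
        · push_cast at h1 h2 ⊢; omega
      · rintro ⟨h1, h2⟩
        by_cases ht : d.getD x 0 - 1 = 0
        · left; simp [ht]
        · right; push_cast at h2 ⊢; omega
    · simp only [zlist, List.mem_append, ih, PySem.Dict.getD_insert, if_neg h,
        List.count_cons_of_ne (Ne.symm h)]
      constructor
      · rintro (hz | hh)
        · exfalso
          revert hz
          split_ifs <;> simp_all
        · exact hh
      · intro hh; right; exact hh

theorem zlist_nodup (kids : List Int) : ∀ (d : PySem.Dict Int Int), (zlist kids d).Nodup := by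
  induction kids with
  | nil => intro d; simp [zlist]
  | cons c cs ih =>
    intro d
    simp only [zlist]
    by_cases ht : d.getD c 0 - 1 = 0
    · simp only [if_pos ht, List.singleton_append, List.nodup_cons]
      refine ⟨fun hmem => ?_, ih _⟩
      rw [zlist_mem] at hmem
      rw [PySem.Dict.getD_insert, if_pos rfl, ht] at hmem
      omega
    · simpa [if_neg ht] using ih _

-- ---- A-side loop invariant ----
def InvA (children : List (Int × List Int)) (b : Int) (T q : List Int) (d : PySem.Dict Int Int) : Prop :=
  (∀ x, d.getD x 0 = (pvNeed children x : Int) - (pvSup children b T x : Int)) ∧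
  (T ++ q).Nodup ∧
  (∀ x, x ∈ T ++ q ↔ (1 ≤ pvNeed children x ∧ pvNeed children x ≤ pvSup children b T x))

theorem stepA (children : List (Int × List Int)) (b : Int) (T q : List Int) (i : Int)
    (d : PySem.Dict Int Int) (h : InvA children b T (i :: q) d) :
    InvA children b (T ++ [i]) ((zlist (pvKids children i) d).reverse ++ q)
      (scanD (pvKids children i) d) := by
  obtain ⟨h1, h2, h3⟩ := h
  have hsup' : ∀ x, pvSup children b (T ++ [i]) x
      = pvSup children b T x + (pvKids children i).count x := by
    intro x
    rw [pvSup_append]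
    simp
  have hz_iff : ∀ x, x ∈ zlist (pvKids children i) d ↔
      (pvSup children b T x < pvNeed children x ∧
       pvNeed children x ≤ pvSup children b T x + (pvKids children i).count x) := by
    intro x
    rw [zlist_mem, h1 x]
    constructor <;> intro ⟨ha, hb⟩ <;> constructor <;> omega
  have hox : ∀ x, (x ∈ T ∨ x = i ∨ x ∈ q) ↔
      (1 ≤ pvNeed children x ∧ pvNeed children x ≤ pvSup children b T x) := by
    intro x
    have := h3 x
    simpa using this
  refine ⟨?_, ?_, ?_⟩
  · intro x
    rw [getD_scanD, h1 x, hsup']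
    push_cast; ring
  · have hznd := zlist_nodup (pvKids children i) d
    have hdisj : ∀ a ∈ T ++ i :: q, ∀ c ∈ zlist (pvKids children i) d, a ≠ c := by
      intro a ha c hc hac
      subst hac
      have h₁ := (hox a).mp (by simpa using ha)
      have h₂ := (hz_iff a).mp hc
      omega
    have hperm : List.Perm (T ++ [i] ++ ((zlist (pvKids children i) d).reverse ++ q))
        ((T ++ i :: q) ++ zlist (pvKids children i) d) := by
      apply List.perm_iff_count.mpr
      intro a
      by_cases ha : a = i <;>
        simp [List.count_append, List.count_reverse, List.count_cons, ha] <;> try omega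
    exact hperm.symm.nodup (List.nodup_append.mpr ⟨h2, hznd, hdisj⟩)
  · intro x
    have hmem : x ∈ T ++ [i] ++ ((zlist (pvKids children i) d).reverse ++ q)
        ↔ (x ∈ T ∨ x = i ∨ x ∈ zlist (pvKids children i) d ∨ x ∈ q) := by
      simp only [List.mem_append, List.mem_reverse, List.mem_singleton]
      tauto
    rw [hmem, hsup']
    constructor
    · rintro (hT | hi | hz | hq)
      · have := (hox x).mp (Or.inl hT); omega
      · have := (hox x).mp (Or.inr (Or.inl hi)); omega
      · have := (hz_iff x).mp hz; omega
      · have := (hox x).mp (Or.inr (Or.inr hq)); omega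
    · rintro ⟨hn1, hn2⟩
      by_cases hle : pvNeed children x ≤ pvSup children b T x
      · rcases (hox x).mpr ⟨hn1, hle⟩ with hT | hi | hq
        · exact Or.inl hT
        · exact Or.inr (Or.inl hi)
        · exact Or.inr (Or.inr (Or.inr hq))
      · exact Or.inr (Or.inr (Or.inl ((hz_iff x).mpr ⟨by omega, hn2⟩)))

theorem mem_dedup_of_need (children : List (Int × List Int)) (x : Int)
    (h : 1 ≤ pvNeed children x) : x ∈ (pvFlat children).dedup := by
  rw [List.mem_dedup]
  exact List.count_pos_iff.mp h

theorem len_le_dedup (children : List (Int × List Int)) (l : List Int) (hnd : l.Nodup)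
    (h : ∀ x ∈ l, 1 ≤ pvNeed children x) : l.length ≤ (pvFlat children).dedup.length := by
  exact (hnd.subperm (fun x hx => mem_dedup_of_need children x (h x hx))).length_le

theorem runA (children : List (Int × List Int)) (b : Int) (L : List Int)
    (hL : PreFix children b L) :
    ∀ n fuel T q d dep, InvA children b T q d → (∀ x ∈ T ++ q, x ∈ L) →
    q.length + 2 * ((pvFlat children).dedup.length - (T ++ q).length) ≤ n → n < fuel →
    ∃ Tf, Tf.Nodup ∧
      (∀ x, x ∈ Tf ↔ (1 ≤ pvNeed children x ∧ pvNeed children x ≤ pvSup children b Tf x)) ∧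
      (∀ x ∈ Tf, x ∈ L) ∧ T.length ≤ Tf.length ∧
      loopA children fuel q d dep = dep + ((Tf.length - T.length : Nat) : Int) := by
  intro n
  induction n with
  | zero =>
    intro fuel T q d dep hInv hsub hm hf
    have hq : q = [] := by
      have : q.length = 0 := by omega
      exact List.eq_nil_of_length_eq_zero this
    subst hq
    obtain ⟨h1, h2, h3⟩ := hInv
    refine ⟨T, by simpa using h2, fun x => by simpa using h3 x, fun x hx => hsub x (by simpa using hx),
      le_refl _, ?_⟩
    obtain ⟨f, rfl⟩ : ∃ f, fuel = f + 1 := ⟨fuel - 1, by omega⟩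
    simp [loopA]
  | succ n ih =>
    intro fuel T q d dep hInv hsub hm hf
    cases q with
    | nil =>
      obtain ⟨h1, h2, h3⟩ := hInv
      refine ⟨T, by simpa using h2, fun x => by simpa using h3 x, fun x hx => hsub x (by simpa using hx),
        le_refl _, ?_⟩
      obtain ⟨f, rfl⟩ : ∃ f, fuel = f + 1 := ⟨fuel - 1, by omega⟩
      simp [loopA]
    | cons i rest =>
      obtain ⟨f, rfl⟩ : ∃ f, fuel = f + 1 := ⟨fuel - 1, by omega⟩
      have hstep := stepA children b T rest i d hInv
      obtain ⟨h1', h2', h3'⟩ := hstep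
      obtain ⟨h1, h2, h3⟩ := hInv
      -- the new frontier is inside L
      have hTi_nd : (T ++ [i]).Nodup := by
        have : (T ++ [i]).Sublist (T ++ i :: rest) := by
          exact List.Sublist.append_left (by simp) T
        exact this.nodup h2
      have hTi_sub : ∀ x ∈ T ++ [i], x ∈ L := by
        intro x hx
        apply hsub
        rcases List.mem_append.mp hx with h | h
        · exact List.mem_append.mpr (Or.inl h)
        · simp at h; simp [h]
      have hz_subL : ∀ x ∈ (zlist (pvKids children i) d).reverse ++ rest, x ∈ L := by
        intro x hx
        rcases List.mem_append.mp hx with hz | hr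
        · rw [List.mem_reverse] at hz
          have hmem' : x ∈ (T ++ [i]) ++ ((zlist (pvKids children i) d).reverse ++ rest) := by
            simp [hz]
          have hx' := (h3' x).mp hmem'
          apply hL x hx'.1
          calc pvNeed children x ≤ pvSup children b (T ++ [i]) x := hx'.2
            _ ≤ pvSup children b L x :=
              pvSup_mono children b (T ++ [i]) L hTi_nd (fun y hy => hTi_sub y hy) x
        · exact hsub x (by simp [hr])
      have hsub' : ∀ x ∈ (T ++ [i]) ++ ((zlist (pvKids children i) d).reverse ++ rest), x ∈ L := by
        intro x hx
        rcases List.mem_append.mp hx with h | h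
        · exact hTi_sub x h
        · exact hz_subL x h
      -- length bookkeeping
      have hlenO : (T ++ i :: rest).length ≤ (pvFlat children).dedup.length :=
        len_le_dedup children _ h2 (fun x hx => ((h3 x).mp hx).1)
      have hlenN : ((T ++ [i]) ++ ((zlist (pvKids children i) d).reverse ++ rest)).length
          ≤ (pvFlat children).dedup.length :=
        len_le_dedup children _ h2' (fun x hx => ((h3' x).mp hx).1)
      have hmeas : ((zlist (pvKids children i) d).reverse ++ rest).length
          + 2 * ((pvFlat children).dedup.length
            - ((T ++ [i]) ++ ((zlist (pvKids children i) d).reverse ++ rest)).length) ≤ n := by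
        simp only [List.length_append, List.length_cons, List.length_reverse] at hm hlenO hlenN ⊢
        omega
      have hrec := ih f (T ++ [i]) ((zlist (pvKids children i) d).reverse ++ rest)
        (scanD (pvKids children i) d) (dep + 1) ⟨h1', h2', h3'⟩ hsub' hmeas (by omega)
      obtain ⟨Tf, hfnd, hffix, hfsub, hflen, heq⟩ := hrec
      refine ⟨Tf, hfnd, hffix, hfsub, ?_, ?_⟩
      · simp only [List.length_append, List.length_singleton] at hflen; omega
      · show loopA children (f + 1) (i :: rest) d dep = _
        simp only [loopA, foldA_eq]
        rw [show (PySem.Dict.mk children).getD i [] = pvKids children i from rfl]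
        rw [heq]
        simp only [List.length_append, List.length_singleton] at hflen ⊢
        omega

-- ---- B-side ----
theorem bumpAll_getD (kids : List Int) (s : PySem.Dict Int Int) (x : Int) :
    (bumpAll s kids).getD x 0 = s.getD x 0 + (kids.count x : Int) := by
  simpa [bumpAll] using PySem.Dict.getD_foldl_insert_add_one kids s x

theorem supply_fold_getD (children : List (Int × List Int)) (S : List Int) :
    ∀ (s : PySem.Dict Int Int) (x : Int),
    (S.foldl (fun s k => bumpAll s ((PySem.Dict.mk children).getD k [])) s).getD x 0
      = s.getD x 0 + ((S.flatMap (pvKids children)).count x : Int) := by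
  induction S with
  | nil => intro s x; simp
  | cons k ks ih =>
    intro s x
    simp only [List.foldl_cons, List.flatMap_cons, List.count_append, ih, bumpAll_getD, pvKids]
    push_cast; ring

theorem runB (children : List (Int × List Int)) (b : Int) :
    ∀ fuel freed pending supply,
    (∀ x, supply.getD x 0 = (pvSup children b freed x : Int)) →
    (freed ++ pending).Nodup →
    (∀ x, 1 ≤ pvNeed children x ↔ (x ∈ freed ∨ x ∈ pending)) →
    (∀ x ∈ freed, pvNeed children x ≤ pvSup children b freed x) →
    (∀ M, M.Nodup → PreFix children b M → freed ⊆ M) →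
    (PySem.Dict.counter (pvFlat children)).keys.length + 1 ≤ fuel + freed.length →
    ∃ L : List Int,
      roundsB children (PySem.Dict.counter (pvFlat children)) fuel freed pending supply = (L.length : Int)
      ∧ L.Nodup
      ∧ (∀ x, x ∈ L ↔ (1 ≤ pvNeed children x ∧ pvNeed children x ≤ pvSup children b L x))
      ∧ (∀ M, M.Nodup → PreFix children b M → L ⊆ M) := by
  intro fuel
  induction fuel with
  | zero =>
    intro freed pending supply hsup hnd hcover hsat hmin hfuel
    exfalso
    have hfnd : freed.Nodup := hnd.of_append_left
    have hfsub : freed ⊆ (PySem.Dict.counter (pvFlat children)).keys := by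
      intro x hx
      rw [PySem.Dict.keys_counter]
      rw [PySem.Set.mem_ofList]
      exact List.count_pos_iff.mp ((hcover x).mpr (Or.inl hx))
    have := (hfnd.subperm hfsub).length_le
    omega
  | succ f ih =>
    intro freed pending supply hsup hnd hcover hsat hmin hfuel
    have hpred : ∀ x, (decide ((PySem.Dict.counter (pvFlat children)).getD x 0 ≤ supply.getD x 0) = true)
        ↔ (pvNeed children x ≤ pvSup children b freed x) := by
      intro x
      rw [decide_eq_true_eq, PySem.Dict.getD_counter, hsup x]
      exact_mod_cast Iff.rfl
    have hmemnew : ∀ x, x ∈ pending.filter (fun x => decide ((PySem.Dict.counter (pvFlat children)).getD x 0 ≤ supply.getD x 0))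
        ↔ (x ∈ pending ∧ pvNeed children x ≤ pvSup children b freed x) := by
      intro x
      rw [List.mem_filter, hpred x]
    simp only [roundsB]
    by_cases hemp : (pending.filter (fun x => decide ((PySem.Dict.counter (pvFlat children)).getD x 0 ≤ supply.getD x 0))).isEmpty
    · rw [if_pos hemp]
      have hnil : pending.filter (fun x => decide ((PySem.Dict.counter (pvFlat children)).getD x 0 ≤ supply.getD x 0)) = [] :=
        List.isEmpty_iff.mp hemp
      refine ⟨freed, rfl, hnd.of_append_left, ?_, hmin⟩
      intro x
      constructor
      · intro hx
        exact ⟨(hcover x).mpr (Or.inl hx), hsat x hx⟩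
      · rintro ⟨h1, h2⟩
        rcases (hcover x).mp h1 with hf | hp
        · exact hf
        · exfalso
          have : x ∈ pending.filter (fun x => decide ((PySem.Dict.counter (pvFlat children)).getD x 0 ≤ supply.getD x 0)) :=
            (hmemnew x).mpr ⟨hp, h2⟩
          rw [hnil] at this
          simp at this
    · rw [if_neg hemp]
      set newly := pending.filter (fun x => decide ((PySem.Dict.counter (pvFlat children)).getD x 0 ≤ supply.getD x 0)) with hnewly
      have hpnd : pending.Nodup := hnd.of_append_right
      have hnewnd : newly.Nodup := hpnd.filter _
      have hnew_sub : ∀ x ∈ newly, x ∈ pending ∧ pvNeed children x ≤ pvSup children b freed x :=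
        fun x hx => (hmemnew x).mp hx
      -- pending.filter (∉ newly) is pending.filter (¬ pred)
      have hpend' : pending.filter (fun x => decide (x ∉ newly))
          = pending.filter (fun x => !(decide ((PySem.Dict.counter (pvFlat children)).getD x 0 ≤ supply.getD x 0))) := by
        apply List.filter_congr
        intro x hx
        rcases h : decide ((PySem.Dict.counter (pvFlat children)).getD x 0 ≤ supply.getD x 0) with _ | _
        · simp only [Bool.not_false, decide_eq_true_eq]
          have : x ∉ newly := by
            intro hc
            have := ((hmemnew x).mp hc).2
            rw [← hpred x, h] at this
            exact Bool.false_ne_true this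
          simpa using this
        · simp only [Bool.not_true, decide_eq_false_iff_not, Decidable.not_not]
          rw [hnewly]
          exact List.mem_filter.mpr ⟨hx, h⟩
      have hperm : List.Perm (newly ++ pending.filter (fun x => decide (x ∉ newly))) pending := by
        rw [hpend', hnewly]
        exact List.filter_append_perm _ pending
      have hpermAll : List.Perm ((freed ++ newly) ++ pending.filter (fun x => decide (x ∉ newly)))
          (freed ++ pending) := by
        rw [List.append_assoc]
        exact hperm.append_left freed
      -- new invariants
      have hsup' : ∀ x, (newly.foldl (fun s k => bumpAll s ((PySem.Dict.mk children).getD k [])) supply).getD x 0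
          = (pvSup children b (freed ++ newly) x : Int) := by
        intro x
        rw [supply_fold_getD, hsup x, pvSup_append]
        push_cast; ring
      have hnd' : ((freed ++ newly) ++ pending.filter (fun x => decide (x ∉ newly))).Nodup :=
        hpermAll.symm.nodup hnd
      have hcover' : ∀ x, 1 ≤ pvNeed children x
          ↔ (x ∈ freed ++ newly ∨ x ∈ pending.filter (fun x => decide (x ∉ newly))) := by
        intro x
        rw [← List.mem_append, hpermAll.mem_iff, List.mem_append]
        exact hcover x
      have hsup_le : ∀ x, pvSup children b freed x ≤ pvSup children b (freed ++ newly) x := by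
        intro x
        rw [pvSup_append]
        omega
      have hsat' : ∀ x ∈ freed ++ newly,
          pvNeed children x ≤ pvSup children b (freed ++ newly) x := by
        intro x hx
        rcases List.mem_append.mp hx with h | h
        · exact le_trans (hsat x h) (hsup_le x)
        · exact le_trans ((hnew_sub x h).2) (hsup_le x)
      have hmin' : ∀ M, M.Nodup → PreFix children b M → (freed ++ newly) ⊆ M := by
        intro M hMnd hMpre
        have hfM : freed ⊆ M := hmin M hMnd hMpre
        intro x hx
        rcases List.mem_append.mp hx with h | h
        · exact hfM h
        · refine hMpre x ((hcover x).mpr (Or.inr (hnew_sub x h).1)) ?_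
          exact le_trans (hnew_sub x h).2
            (pvSup_mono children b freed M hnd.of_append_left hfM x)
      have hlen : 0 < newly.length := by
        refine List.length_pos_of_ne_nil fun h => absurd ?_ hemp
        simp [h]
      have hfuel' : (PySem.Dict.counter (pvFlat children)).keys.length + 1
          ≤ f + (freed ++ newly).length := by
        simp only [List.length_append]
        omega
      exact ih (freed ++ newly) (pending.filter (fun x => decide (x ∉ newly)))
        (newly.foldl (fun s k => bumpAll s ((PySem.Dict.mk children).getD k [])) supply)
        hsup' hnd' hcover' hsat' hmin' hfuel'

theorem B_characterized (children : List (Int × List Int)) (b : Int) :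
    ∃ L : List Int, getDependencies_alt children b = (L.length : Int)
      ∧ L.Nodup
      ∧ (∀ x, x ∈ L ↔ (1 ≤ pvNeed children x ∧ pvNeed children x ≤ pvSup children b L x))
      ∧ (∀ M, M.Nodup → PreFix children b M → L ⊆ M) := by
  have hflat : ((PySem.Dict.mk children).values.flatMap id) = pvFlat children := rfl
  have hkids : (PySem.Dict.mk children).getD b [] = pvKids children b := rfl
  have hsup0 : ∀ x, (PySem.Dict.counter (pvKids children b)).getD x 0
      = (pvSup children b [] x : Int) := by
    intro x
    rw [PySem.Dict.getD_counter]
    simp [pvSup]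
  have hnd0 : (([] : List Int) ++ (PySem.Dict.counter (pvFlat children)).keys).Nodup := by
    simp only [List.nil_append]
    exact PySem.Dict.nodup_keys_counter (pvFlat children)
  have hcover0 : ∀ x, 1 ≤ pvNeed children x
      ↔ (x ∈ ([] : List Int) ∨ x ∈ (PySem.Dict.counter (pvFlat children)).keys) := by
    intro x
    rw [PySem.Dict.keys_counter, PySem.Set.mem_ofList]
    simp only [List.not_mem_nil, false_or]
    exact ⟨fun h => List.count_pos_iff.mp h, fun h => List.count_pos_iff.mpr h⟩
  obtain ⟨L, hval, hnd, hfix, hmin⟩ := runB children b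
    ((PySem.Dict.counter (pvFlat children)).keys.length + 1)
    [] (PySem.Dict.counter (pvFlat children)).keys (PySem.Dict.counter (pvKids children b))
    hsup0 hnd0 hcover0 (by simp) (fun M _ _ => List.nil_subset M) (by simp)
  refine ⟨L, ?_, hnd, hfix, hmin⟩
  simp only [getDependencies_alt, hflat, hkids]
  exact hval

theorem A_characterized (children : List (Int × List Int)) (b : Int) (L : List Int)
    (hL : PreFix children b L) :
    ∃ Tf, Tf.Nodup ∧
      (∀ x, x ∈ Tf ↔ (1 ≤ pvNeed children x ∧ pvNeed children x ≤ pvSup children b Tf x)) ∧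
      (∀ x ∈ Tf, x ∈ L) ∧ getDependencies children b = (Tf.length : Int) := by
  have hpv : pvFlat children = ((PySem.Dict.mk children).values).flatten := by
    simp [pvFlat, List.flatMap_def]
  have hbuild : ((PySem.Dict.mk children).values).foldl
      (fun d kids => kids.foldl (fun d c => d.insert c (d.getD c 0 + 1)) d) PySem.Dict.empty
      = PySem.Dict.counter (pvFlat children) := by
    rw [hpv, ← PySem.Dict.foldl_insert_getD_add_one_eq_counter, List.foldl_flatten]
  have hneed : ∀ x, (PySem.Dict.counter (pvFlat children)).getD x 0 = (pvNeed children x : Int) := by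
    intro x
    exact PySem.Dict.getD_counter (pvFlat children) x
  -- the state after the initial pop of b
  have hInv0 : InvA children b [] ((zlist (pvKids children b) (PySem.Dict.counter (pvFlat children))).reverse)
      (scanD (pvKids children b) (PySem.Dict.counter (pvFlat children))) := by
    refine ⟨?_, ?_, ?_⟩
    · intro x
      rw [getD_scanD, hneed x]
      simp [pvSup, pvKids]
    · simpa using List.nodup_reverse.mpr (zlist_nodup (pvKids children b) _)
    · intro x
      simp only [List.nil_append, List.mem_reverse]
      rw [zlist_mem, hneed x]
      simp only [pvSup, List.flatMap_nil, List.count_nil]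
      constructor <;> intro ⟨ha, hb⟩ <;> constructor <;> omega
  obtain ⟨h1₀, h2₀, h3₀⟩ := hInv0
  have hsub0 : ∀ x ∈ ([] : List Int) ++ (zlist (pvKids children b) (PySem.Dict.counter (pvFlat children))).reverse, x ∈ L := by
    intro x hx
    have hx' := (h3₀ x).mp hx
    apply hL x hx'.1
    calc pvNeed children x ≤ pvSup children b [] x := hx'.2
      _ ≤ pvSup children b L x := by
        simp only [pvSup, List.flatMap_nil, List.count_nil]
        omega
  have hzlen : ((zlist (pvKids children b) (PySem.Dict.counter (pvFlat children))).reverse).length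
      ≤ (pvFlat children).dedup.length := by
    refine len_le_dedup children _ (List.nodup_reverse.mpr (zlist_nodup (pvKids children b) _)) ?_
    intro x hx
    exact ((h3₀ x).mp (by simpa using hx)).1
  have hdedup_le : (pvFlat children).dedup.length ≤ (pvFlat children).length :=
    (List.dedup_sublist _).length_le
  obtain ⟨Tf, hfnd, hffix, hfsub, _, heq⟩ := runA children b L hL
    (2 * (pvFlat children).dedup.length) (2 * (pvFlat children).length + 1)
    [] ((zlist (pvKids children b) (PySem.Dict.counter (pvFlat children))).reverse)
    (scanD (pvKids children b) (PySem.Dict.counter (pvFlat children))) 0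
    ⟨h1₀, h2₀, h3₀⟩ hsub0
    (by simp only [List.nil_append]; omega)
    (by omega)
  refine ⟨Tf, hfnd, hffix, hfsub, ?_⟩
  have hflen : ((PySem.Dict.mk children).values.flatMap id) = pvFlat children := rfl
  simp only [getDependencies, hbuild, hflen]
  rw [show 2 * (pvFlat children).length + 2 = (2 * (pvFlat children).length + 1) + 1 from rfl]
  simp only [loopA, foldA_eq]
  rw [show (PySem.Dict.mk children).getD b [] = pvKids children b from rfl]
  rw [show ((-1 : Int) + 1) = 0 from rfl, List.append_nil, heq]
  simp

-- ===== VERDICT (by name: the statement is the Claim_ definition above) =====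
theorem getDependencies_spec : Claim_equal_getDependencies := by
  unfold Claim_equal_getDependencies
  intro children b _ _
  unfold Spec_getDependencies
  obtain ⟨L, hBval, hLnd, hLfix, hLmin⟩ := B_characterized children b
  have hLpre : PreFix children b L := fun x h1 h2 => (hLfix x).mpr ⟨h1, h2⟩
  obtain ⟨Tf, hTnd, hTfix, hTsub, hAval⟩ := A_characterized children b L hLpre
  have hTpre : PreFix children b Tf := fun x h1 h2 => (hTfix x).mpr ⟨h1, h2⟩
  have hLT : L ⊆ Tf := hLmin Tf hTnd hTpre
  have hlen : Tf.length = L.length :=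
    ((hTnd.subperm hTsub).antisymm (hLnd.subperm hLT)).length_eq
  rw [hAval, hBval, hlen]
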